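-- pv_equiv track=rewrite | github.com/Rayality/python_practice | problems/a_hard_set.py | best_student_and_score
-- ===== SOURCE A (Python) =====
-- def best_student_and_score(answer_key):
--     azami_guesses = "ABC"
--     baz_guesses = "BABC"
--     caris_guesses = "AACCBB"
--     acount = [0, "Azami"]
--     bcount = [0, "Baz"]
--     ccount = [0, "Caris"]
--     for ind, char in enumerate(answer_key):
--         cletter = caris_guesses[ind % 6]
--         bletter = baz_guesses[ind % 4]
--         aletter = azami_guesses[ind % 3]
--         if char == aletter:
--             acount[0] += 1
--         if char == bletter:
--             bcount[0] += 1
--         if char == cletter: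
--             ccount[0] += 1
--     winner = max(acount, bcount, ccount)
--     return winner[0], winner[1]
-- ===== SOURCE B (Python) =====
-- def best_student_and_score(answer_key):
--     # Histogram approach: 12 = lcm(3, 4, 6), so each student's cyclic guess
--     # pattern is one fixed 12-letter row.  Build a (position mod 12, char)
--     # frequency table in one pass, then each score is a 12-term table lookup
--     # sum -- no per-character pattern comparisons.
--     freq = {}
--     for i, ch in enumerate(answer_key):
--         key = (i % 12, ch)
--         freq[key] = freq.get(key, 0) + 1
--     students = [("Azami", "ABCABCABCABC"),
--                 ("Baz", "BABCBABCBABC"),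
--                 ("Caris", "AACCBBAACCBB")]
--     results = [[sum(freq.get(key, 0) for key in enumerate(row)), name]
--                for name, row in students]
--     best = max(results)
--     return best[0], best[1]
-- ===== Notes on version B (the rewrite author's own statement) =====
-- stated objective: alternative
-- what changed: Instead of comparing every answer character against three cyclic patterns, B builds a (position mod 12, char) frequency dictionary in one pass (12 = lcm of the pattern lengths) and computes each student's score as a 12-term histogram-lookup sum over that student's fixed 12-letter row, then takes max over [count, name] pairs.
import Mathlib
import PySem

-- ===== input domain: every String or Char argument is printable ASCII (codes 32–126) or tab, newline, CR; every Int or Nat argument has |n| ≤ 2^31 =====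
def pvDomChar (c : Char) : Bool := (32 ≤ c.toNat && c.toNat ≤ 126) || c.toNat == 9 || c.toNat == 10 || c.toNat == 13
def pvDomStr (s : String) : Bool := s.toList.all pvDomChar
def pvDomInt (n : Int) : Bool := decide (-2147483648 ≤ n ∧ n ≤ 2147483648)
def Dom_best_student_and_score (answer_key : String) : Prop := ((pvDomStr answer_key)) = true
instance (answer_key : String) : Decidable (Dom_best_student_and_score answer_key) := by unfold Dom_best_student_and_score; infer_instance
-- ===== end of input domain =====

-- B replaces A's per-character pattern matching by a (position mod 12, char) frequency
-- dictionary plus 12-term histogram-lookup sums per student (alternative algorithm).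

-- ===== PORT A =====
-- Python list comparison [c1,n1] > [c2,n2]: lexicographic (count first, then name).
def pyPairGt (x y : Int × String) : Bool :=
  decide (y.1 < x.1) || (x.1 == y.1 && decide (y.2 < x.2))

def best_student_and_score (answer_key : String) : Int × String :=
  let counts := (PySem.List.enumerate answer_key.toList 0).foldl
    (fun (s : Int × Int × Int) (ic : Int × Char) =>
      let cletter := PySem.Str.pyGet? "AACCBB" (PySem.Int.mod ic.1 6)
      let bletter := PySem.Str.pyGet? "BABC" (PySem.Int.mod ic.1 4)
      let aletter := PySem.Str.pyGet? "ABC" (PySem.Int.mod ic.1 3)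
      (if some ic.2 = aletter then s.1 + 1 else s.1,
       if some ic.2 = bletter then s.2.1 + 1 else s.2.1,
       if some ic.2 = cletter then s.2.2 + 1 else s.2.2)) (0, 0, 0)
  let acount : Int × String := (counts.1, "Azami")
  let bcount : Int × String := (counts.2.1, "Baz")
  let ccount : Int × String := (counts.2.2, "Caris")
  -- max(acount, bcount, ccount): keep the first, replace when a later one is strictly greater
  let m1 := if pyPairGt bcount acount then bcount else acount
  let winner := if pyPairGt ccount m1 then ccount else m1
  (winner.1, winner.2)

-- ===== PORT B =====
def best_student_and_score_alt (answer_key : String) : Int × String :=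
  -- freq[(i % 12, ch)] += 1 over enumerate(answer_key)
  let freq : PySem.Dict (Int × Char) Int :=
    (PySem.List.enumerate answer_key.toList 0).foldl
      (fun d ic =>
        let key : Int × Char := (PySem.Int.mod ic.1 12, ic.2)
        d.insert key (d.getD key 0 + 1)) PySem.Dict.empty
  let students : List (String × String) :=
    [("Azami", "ABCABCABCABC"), ("Baz", "BABCBABCBABC"), ("Caris", "AACCBBAACCBB")]
  let results : List (Int × String) := students.map (fun nr =>
    ((PySem.List.enumerate nr.2.toList 0).foldl
        (fun acc key => acc + freq.getD key 0) 0, nr.1))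
  -- max(results): keep the first, replace when a later one is strictly greater
  match results with
  | [] => (0, "")  -- unreachable: results has three entries (Python max would raise on [])
  | r :: rs =>
    let best := rs.foldl (fun b x => if pyPairGt x b then x else b) r
    (best.1, best.2)

-- ===== PRECONDITION & SPEC =====
def Spec_best_student_and_score (answer_key : String) (out : Int × String) : Prop := out = best_student_and_score_alt answer_key
instance (answer_key : String) (out : Int × String) : Decidable (Spec_best_student_and_score answer_key out) := by unfold Spec_best_student_and_score; infer_instance

-- ===== CLAIM (what is proved, stated in full; the proofs are below) =====
def Claim_equal_best_student_and_score : Prop := ∀ (answer_key : String), Dom_best_student_and_score answer_key → Spec_best_student_and_score answer_key (best_student_and_score answer_key)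

-- ===== LEMMAS AND PROOFS =====

/-- The keyed list B's dictionary counts: (index mod 12, char) for each enumerated char. -/
def pvKeyed (xs : List Char) (n : Int) : List (Int × Char) :=
  (PySem.List.enumerate xs n).map (fun ic => (PySem.Int.mod ic.1 12, ic.2))

/-- A fold carrying three independent conditional counters splits into three folds. -/
theorem pv_foldl_triple (P1 P2 P3 : Int × Char → Prop) [DecidablePred P1] [DecidablePred P2]
    [DecidablePred P3] (zs : List (Int × Char)) (a b c : Int) :
    zs.foldl (fun (s : Int × Int × Int) ic =>
        (if P1 ic then s.1 + 1 else s.1,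
         if P2 ic then s.2.1 + 1 else s.2.1,
         if P3 ic then s.2.2 + 1 else s.2.2)) (a, b, c)
      = (zs.foldl (fun t ic => if P1 ic then t + 1 else t) a,
         zs.foldl (fun t ic => if P2 ic then t + 1 else t) b,
         zs.foldl (fun t ic => if P3 ic then t + 1 else t) c) := by
  induction zs generalizing a b c with
  | nil => rfl
  | cons z zs ih => simp only [List.foldl_cons]; exact ih _ _ _

/-- B's frequency dictionary looks up to a count over the keyed list. -/
theorem pv_freq_getD (xs : List Char) (k : Int × Char) :
    ((PySem.List.enumerate xs 0).foldl
        (fun (d : PySem.Dict (Int × Char) Int) ic =>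
          let key : Int × Char := (PySem.Int.mod ic.1 12, ic.2)
          d.insert key (d.getD key 0 + 1)) PySem.Dict.empty).getD k 0
      = ((pvKeyed xs 0).count k : Int) := by
  show ((PySem.List.enumerate xs 0).foldl
        (fun (d : PySem.Dict (Int × Char) Int) ic =>
          d.insert (PySem.Int.mod ic.1 12, ic.2)
            (d.getD (PySem.Int.mod ic.1 12, ic.2) 0 + 1)) PySem.Dict.empty).getD k 0 = _
  rw [← List.foldl_map (f := fun ic : Int × Char => (PySem.Int.mod ic.1 12, ic.2))
        (g := fun (d : PySem.Dict (Int × Char) Int) key => d.insert key (d.getD key 0 + 1))]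
  rw [PySem.Dict.getD_foldl_insert_add_one]
  simp [pvKeyed, PySem.Dict.getD_empty]

/-- pvS keys l = the histogram sum Σ_{k ∈ keys} (count of k in l) -- B's per-student total. -/
def pvS (keys l : List (Int × Char)) : Int :=
  keys.foldl (fun acc k => acc + (l.count k : Int)) 0

theorem pvS_eq_sum (keys l : List (Int × Char)) :
    pvS keys l = (keys.map (fun k => (l.count k : Int))).sum := by
  simp [pvS, PySem.List.foldl_add]

theorem pv_sum_count (y : Int × Char) (l : List (Int × Char)) :
    ∀ keys : List (Int × Char),
      (keys.map (fun k => (((y :: l).count k : Nat) : Int))).sum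
        = (keys.map (fun k => ((l.count k : Nat) : Int))).sum + (keys.count y : Int) := by
  intro keys
  induction keys with
  | nil => simp
  | cons k ks ih =>
    simp only [List.map_cons, List.sum_cons, ih]
    have hc : (((y :: l).count k : Nat) : Int)
        = ((l.count k : Nat) : Int) + (if k = y then 1 else 0) := by
      rw [List.count_cons]
      push_cast
      simp only [beq_iff_eq]
      by_cases h : k = y
      · simp [h]
      · have h' : ¬ y = k := fun e => h e.symm
        simp [h, h']
    have hy : (((k :: ks).count y : Nat) : Int)
        = ((ks.count y : Nat) : Int) + (if k = y then 1 else 0) := by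
      rw [List.count_cons]
      push_cast
      simp [beq_iff_eq]
    rw [hc, hy]
    ring

theorem pvS_nil (keys : List (Int × Char)) : pvS keys [] = 0 := by
  simp [pvS_eq_sum]

theorem pvS_cons (keys : List (Int × Char)) (y : Int × Char) (l : List (Int × Char)) :
    pvS keys (y :: l) = pvS keys l + (keys.count y : Int) := by
  rw [pvS_eq_sum, pvS_eq_sum, pv_sum_count]

theorem pvKeyed_cons (x : Char) (xs : List Char) (n : Int) :
    pvKeyed (x :: xs) n = (PySem.Int.mod n 12, x) :: pvKeyed xs (n + 1) := by
  simp [pvKeyed, PySem.List.enumerate_cons]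

/-- Generic bridge: A's cyclic-match fold equals B's histogram sum, given the pointwise fact
    that the key row contains (n mod 12, c) exactly when c matches the cyclic guess. -/
theorem pv_main (keys : List (Int × Char)) (pat : String) (L : Int)
    (hptw : ∀ (n : Int) (c : Char),
      (keys.count (PySem.Int.mod n 12, c) : Int)
        = if some c = PySem.Str.pyGet? pat (PySem.Int.mod n L) then 1 else 0) :
    ∀ (xs : List Char) (n a : Int),
      (PySem.List.enumerate xs n).foldl
          (fun t ic => if some ic.2 = PySem.Str.pyGet? pat (PySem.Int.mod ic.1 L) then t + 1 else t) a
        = a + pvS keys (pvKeyed xs n) := by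
  intro xs
  induction xs with
  | nil => intro n a; simp [PySem.List.enumerate_nil, pvKeyed, pvS_nil]
  | cons x xs ih =>
    intro n a
    rw [PySem.List.enumerate_cons, List.foldl_cons, ih, pvKeyed_cons, pvS_cons, hptw]
    split_ifs <;> ring

theorem pv_ptw_azami (n : Int) (c : Char) :
    ((PySem.List.enumerate "ABCABCABCABC".toList 0).count (PySem.Int.mod n 12, c) : Int)
      = if some c = PySem.Str.pyGet? "ABC" (PySem.Int.mod n 3) then 1 else 0 := by
  have hk : PySem.List.enumerate "ABCABCABCABC".toList 0
      = [((0:Int),'A'),(1,'B'),(2,'C'),(3,'A'),(4,'B'),(5,'C'),(6,'A'),(7,'B'),(8,'C'),(9,'A'),(10,'B'),(11,'C')] := by decide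
  rw [hk, PySem.Int.mod_eq_emod_of_pos (by norm_num : (0:Int) < 12),
      PySem.Int.mod_eq_emod_of_pos (by norm_num : (0:Int) < 3)]
  have h0 : 0 ≤ n % 12 := Int.emod_nonneg n (by norm_num)
  have h1 : n % 12 < 12 := Int.emod_lt_of_pos n (by norm_num)
  have hL : n % 3 = (n % 12) % 3 := by omega
  rw [hL]
  generalize n % 12 = m at h0 h1 ⊢
  have e0 : PySem.Str.pyGet? "ABC" ((0:Int) % 3) = some 'A' := by decide
  have e1 : PySem.Str.pyGet? "ABC" ((1:Int) % 3) = some 'B' := by decide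
  have e2 : PySem.Str.pyGet? "ABC" ((2:Int) % 3) = some 'C' := by decide
  have e3 : PySem.Str.pyGet? "ABC" ((3:Int) % 3) = some 'A' := by decide
  have e4 : PySem.Str.pyGet? "ABC" ((4:Int) % 3) = some 'B' := by decide
  have e5 : PySem.Str.pyGet? "ABC" ((5:Int) % 3) = some 'C' := by decide
  have e6 : PySem.Str.pyGet? "ABC" ((6:Int) % 3) = some 'A' := by decide
  have e7 : PySem.Str.pyGet? "ABC" ((7:Int) % 3) = some 'B' := by decide
  have e8 : PySem.Str.pyGet? "ABC" ((8:Int) % 3) = some 'C' := by decide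
  have e9 : PySem.Str.pyGet? "ABC" ((9:Int) % 3) = some 'A' := by decide
  have e10 : PySem.Str.pyGet? "ABC" ((10:Int) % 3) = some 'B' := by decide
  have e11 : PySem.Str.pyGet? "ABC" ((11:Int) % 3) = some 'C' := by decide
  interval_cases m <;>
    simp [List.count_cons, Prod.ext_iff, e0,e1,e2,e3,e4,e5,e6,e7,e8,e9,e10,e11] <;>
    simp [eq_comm]

theorem pv_ptw_baz (n : Int) (c : Char) :
    ((PySem.List.enumerate "BABCBABCBABC".toList 0).count (PySem.Int.mod n 12, c) : Int)
      = if some c = PySem.Str.pyGet? "BABC" (PySem.Int.mod n 4) then 1 else 0 := by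
  have hk : PySem.List.enumerate "BABCBABCBABC".toList 0
      = [((0:Int),'B'),(1,'A'),(2,'B'),(3,'C'),(4,'B'),(5,'A'),(6,'B'),(7,'C'),(8,'B'),(9,'A'),(10,'B'),(11,'C')] := by decide
  rw [hk, PySem.Int.mod_eq_emod_of_pos (by norm_num : (0:Int) < 12),
      PySem.Int.mod_eq_emod_of_pos (by norm_num : (0:Int) < 4)]
  have h0 : 0 ≤ n % 12 := Int.emod_nonneg n (by norm_num)
  have h1 : n % 12 < 12 := Int.emod_lt_of_pos n (by norm_num)
  have hL : n % 4 = (n % 12) % 4 := by omega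
  rw [hL]
  generalize n % 12 = m at h0 h1 ⊢
  have e0 : PySem.Str.pyGet? "BABC" ((0:Int) % 4) = some 'B' := by decide
  have e1 : PySem.Str.pyGet? "BABC" ((1:Int) % 4) = some 'A' := by decide
  have e2 : PySem.Str.pyGet? "BABC" ((2:Int) % 4) = some 'B' := by decide
  have e3 : PySem.Str.pyGet? "BABC" ((3:Int) % 4) = some 'C' := by decide
  have e4 : PySem.Str.pyGet? "BABC" ((4:Int) % 4) = some 'B' := by decide
  have e5 : PySem.Str.pyGet? "BABC" ((5:Int) % 4) = some 'A' := by decide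
  have e6 : PySem.Str.pyGet? "BABC" ((6:Int) % 4) = some 'B' := by decide
  have e7 : PySem.Str.pyGet? "BABC" ((7:Int) % 4) = some 'C' := by decide
  have e8 : PySem.Str.pyGet? "BABC" ((8:Int) % 4) = some 'B' := by decide
  have e9 : PySem.Str.pyGet? "BABC" ((9:Int) % 4) = some 'A' := by decide
  have e10 : PySem.Str.pyGet? "BABC" ((10:Int) % 4) = some 'B' := by decide
  have e11 : PySem.Str.pyGet? "BABC" ((11:Int) % 4) = some 'C' := by decide
  interval_cases m <;>
    simp [List.count_cons, Prod.ext_iff, e0,e1,e2,e3,e4,e5,e6,e7,e8,e9,e10,e11] <;>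
    simp [eq_comm]

theorem pv_ptw_caris (n : Int) (c : Char) :
    ((PySem.List.enumerate "AACCBBAACCBB".toList 0).count (PySem.Int.mod n 12, c) : Int)
      = if some c = PySem.Str.pyGet? "AACCBB" (PySem.Int.mod n 6) then 1 else 0 := by
  have hk : PySem.List.enumerate "AACCBBAACCBB".toList 0
      = [((0:Int),'A'),(1,'A'),(2,'C'),(3,'C'),(4,'B'),(5,'B'),(6,'A'),(7,'A'),(8,'C'),(9,'C'),(10,'B'),(11,'B')] := by decide
  rw [hk, PySem.Int.mod_eq_emod_of_pos (by norm_num : (0:Int) < 12),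
      PySem.Int.mod_eq_emod_of_pos (by norm_num : (0:Int) < 6)]
  have h0 : 0 ≤ n % 12 := Int.emod_nonneg n (by norm_num)
  have h1 : n % 12 < 12 := Int.emod_lt_of_pos n (by norm_num)
  have hL : n % 6 = (n % 12) % 6 := by omega
  rw [hL]
  generalize n % 12 = m at h0 h1 ⊢
  have e0 : PySem.Str.pyGet? "AACCBB" ((0:Int) % 6) = some 'A' := by decide
  have e1 : PySem.Str.pyGet? "AACCBB" ((1:Int) % 6) = some 'A' := by decide
  have e2 : PySem.Str.pyGet? "AACCBB" ((2:Int) % 6) = some 'C' := by decide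
  have e3 : PySem.Str.pyGet? "AACCBB" ((3:Int) % 6) = some 'C' := by decide
  have e4 : PySem.Str.pyGet? "AACCBB" ((4:Int) % 6) = some 'B' := by decide
  have e5 : PySem.Str.pyGet? "AACCBB" ((5:Int) % 6) = some 'B' := by decide
  have e6 : PySem.Str.pyGet? "AACCBB" ((6:Int) % 6) = some 'A' := by decide
  have e7 : PySem.Str.pyGet? "AACCBB" ((7:Int) % 6) = some 'A' := by decide
  have e8 : PySem.Str.pyGet? "AACCBB" ((8:Int) % 6) = some 'C' := by decide
  have e9 : PySem.Str.pyGet? "AACCBB" ((9:Int) % 6) = some 'C' := by decide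
  have e10 : PySem.Str.pyGet? "AACCBB" ((10:Int) % 6) = some 'B' := by decide
  have e11 : PySem.Str.pyGet? "AACCBB" ((11:Int) % 6) = some 'B' := by decide
  interval_cases m <;>
    simp [List.count_cons, Prod.ext_iff, e0,e1,e2,e3,e4,e5,e6,e7,e8,e9,e10,e11] <;>
    simp [eq_comm]

theorem best_student_and_score_spec : Claim_equal_best_student_and_score := by
  intro ak _
  show best_student_and_score ak = best_student_and_score_alt ak
  simp only [best_student_and_score, best_student_and_score_alt, List.map]
  rw [pv_foldl_triple]
  simp only [pv_freq_getD]
  rw [pv_main _ _ _ pv_ptw_azami ak.toList 0 0,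
      pv_main _ _ _ pv_ptw_baz ak.toList 0 0,
      pv_main _ _ _ pv_ptw_caris ak.toList 0 0]
  simp only [zero_add, pvS]
  simp only [List.foldl_cons, List.foldl_nil]
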